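-- pv_equiv track=rewrite | github.com/micheloosterhof/aldegonde | lp.py | decrypt_beaufort_pt_autokey
-- ===== SOURCE A (Python) =====
-- N = 29  # GF(29)
--
-- def decrypt_beaufort_pt_autokey(C: list[int], primer_p: int) -> list[int]:
--     """C(i) = P(i-1) - P(i)  =>  P(i) = P(i-1) - C(i)"""
--     P = []
--     prev_p = primer_p
--     for c in C:
--         p = (prev_p - c) % N
--         P.append(p)
--         prev_p = p
--     return P
-- ===== SOURCE B (Python) =====
-- N = 29  # GF(29)
--
-- def decrypt_beaufort_pt_autokey(C: list[int], primer_p: int) -> list[int]: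
--     """Telescoped form: P(i) = (primer_p - (C[0]+...+C[i])) % N.
--     Stage 1 accumulates the inclusive prefix sums of C; stage 2 maps
--     each prefix sum independently to its plaintext symbol."""
--     sums = []
--     t = 0
--     for c in C:
--         t += c
--         sums.append(t)
--     return [(primer_p - s) % N for s in sums]
-- ===== Notes on version B (the rewrite author's own statement) =====
-- stated objective: alternative
-- what changed: Replaces the chained recurrence carrying the previous plaintext symbol with a staged computation: an inclusive prefix-sum table of C, then an independent map (primer_p - sum) % 29, via the telescoping identity.
import Mathlib
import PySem

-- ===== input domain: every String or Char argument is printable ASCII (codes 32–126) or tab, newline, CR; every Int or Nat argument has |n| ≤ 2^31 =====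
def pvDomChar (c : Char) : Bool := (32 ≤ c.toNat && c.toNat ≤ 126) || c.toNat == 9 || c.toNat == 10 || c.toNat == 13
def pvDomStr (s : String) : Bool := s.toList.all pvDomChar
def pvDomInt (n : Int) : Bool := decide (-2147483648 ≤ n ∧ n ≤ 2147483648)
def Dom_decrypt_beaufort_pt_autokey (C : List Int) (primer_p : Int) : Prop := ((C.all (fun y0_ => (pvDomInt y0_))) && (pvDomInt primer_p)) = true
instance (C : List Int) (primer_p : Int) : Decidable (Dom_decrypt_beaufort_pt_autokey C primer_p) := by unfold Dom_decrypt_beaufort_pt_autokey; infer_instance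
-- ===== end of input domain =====

-- B replaces A's chained recurrence with an inclusive prefix-sum stage followed by an independent map (alternative decomposition; same cost).

-- ===== PORT A =====
def decrypt_beaufort_pt_autokey (C : List Int) (primer_p : Int) : List Int :=
  (C.foldl (fun (st : List Int × Int) c =>
      let p := PySem.Int.mod (st.2 - c) 29
      (st.1 ++ [p], p))
    ([], primer_p)).1

-- ===== PORT B =====
-- stage 1 of Source B: the running-total loop emitting the inclusive prefix sums of C
def pvPrefixSums : List Int → Int → List Int
  | [], _ => []
  | c :: cs, t => (t + c) :: pvPrefixSums cs (t + c)

def decrypt_beaufort_pt_autokey_alt (C : List Int) (primer_p : Int) : List Int :=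
  (pvPrefixSums C 0).map (fun s => PySem.Int.mod (primer_p - s) 29)

-- ===== PRECONDITION & SPEC =====
def Spec_decrypt_beaufort_pt_autokey (C : List Int) (primer_p : Int) (out : List Int) : Prop := out = decrypt_beaufort_pt_autokey_alt C primer_p
instance (C : List Int) (primer_p : Int) (out : List Int) : Decidable (Spec_decrypt_beaufort_pt_autokey C primer_p out) := by unfold Spec_decrypt_beaufort_pt_autokey; infer_instance

-- ===== CLAIM (what is proved, stated in full; the proofs are below) =====
def Claim_equal_decrypt_beaufort_pt_autokey : Prop := ∀ (C : List Int) (primer_p : Int), Dom_decrypt_beaufort_pt_autokey C primer_p → Spec_decrypt_beaufort_pt_autokey C primer_p (decrypt_beaufort_pt_autokey C primer_p)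

-- ===== LEMMAS AND PROOFS =====

-- A's fold with a non-empty accumulated list = accumulated list ++ fold from empty
theorem foldA_acc (C : List Int) (acc : List Int) (prev : Int) :
    (C.foldl (fun (st : List Int × Int) c =>
      let p := PySem.Int.mod (st.2 - c) 29
      (st.1 ++ [p], p)) (acc, prev)).1
    = acc ++ (C.foldl (fun (st : List Int × Int) c =>
      let p := PySem.Int.mod (st.2 - c) 29
      (st.1 ++ [p], p)) ([], prev)).1 := by
  induction C generalizing acc prev with
  | nil => simp
  | cons c C ih =>
    simp only [List.foldl]
    rw [ih, ih ([] ++ [PySem.Int.mod (prev - c) 29])]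
    simp

-- prefix sums started at t are the prefix sums started at 0, shifted by t
theorem prefixSums_shift (C : List Int) (t : Int) :
    pvPrefixSums C t = (pvPrefixSums C 0).map (fun s => t + s) := by
  induction C generalizing t with
  | nil => simp [pvPrefixSums]
  | cons c C ih =>
    simp only [pvPrefixSums, List.map_cons]
    rw [ih (t + c), ih (0 + c)]
    simp only [List.map_map]
    congr 1
    · ring
    · apply List.map_congr_left; intro s _; simp only [Function.comp_apply]; ring

theorem mod29_sub (a b : Int) :
    PySem.Int.mod (PySem.Int.mod a 29 - b) 29 = PySem.Int.mod (a - b) 29 := by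
  simp only [PySem.Int.mod_eq_emod_of_pos (show (0:Int) < 29 by norm_num)]
  conv_rhs => rw [Int.sub_emod]
  rw [Int.sub_emod]
  simp [Int.emod_emod_of_dvd]

-- main telescoping lemma
theorem main_lemma (C : List Int) (prev : Int) :
    (C.foldl (fun (st : List Int × Int) c =>
      let p := PySem.Int.mod (st.2 - c) 29
      (st.1 ++ [p], p)) ([], prev)).1
    = (pvPrefixSums C 0).map (fun s => PySem.Int.mod (prev - s) 29) := by
  induction C generalizing prev with
  | nil => simp [pvPrefixSums]
  | cons c C ih =>
    simp only [List.foldl, pvPrefixSums, List.map_cons]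
    rw [foldA_acc, prefixSums_shift C (0 + c), ih]
    simp only [List.nil_append, List.map_map, List.singleton_append]
    congr 1
    · norm_num
    · apply List.map_congr_left
      intro s _
      simp only [Function.comp_apply]
      rw [mod29_sub, show prev - c - s = prev - (0 + c + s) from by ring]

-- ===== VERDICT (by name: the statement is the Claim_ definition above) =====
theorem decrypt_beaufort_pt_autokey_spec : Claim_equal_decrypt_beaufort_pt_autokey := by
  intro C primer_p _
  unfold Spec_decrypt_beaufort_pt_autokey decrypt_beaufort_pt_autokey decrypt_beaufort_pt_autokey_alt
  exact main_lemma C primer_p
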